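-- pv_equiv track=rewrite | github.com/MalithSrineth/Fonterra-Web-App | array-traverse.py | find_all_subarray_coordinates
-- ===== SOURCE A (Python) =====
-- def find_all_subarray_coordinates(subarray, mainarray):
--     rows_sub, cols_sub = len(subarray), len(subarray[0])
--     rows_main, cols_main = len(mainarray), len(mainarray[0])
--     matches = []  # List to store the starting coordinates of all matches
--
--     # Iterate through mainarray to find all potential starting points
--     for i in range(rows_main - rows_sub + 1):
--         for j in range(cols_main - cols_sub + 1):
--             match_found = True
--             for x in range(rows_sub):
--                 if mainarray[i + x][j:j + cols_sub] != subarray[x]: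
--                     match_found = False
--                     break
--             if match_found:
--                 matches.append((i, j))
--
--     return matches
-- ===== SOURCE B (Python) =====
-- def find_all_subarray_coordinates(subarray, mainarray):
--     rows_sub, cols_sub = len(subarray), len(subarray[0])
--     rows_main, cols_main = len(mainarray), len(mainarray[0])
--     width = cols_main - cols_sub + 1
--
--     # Intern every sub-row and every row-window once: equal contents <-> equal small int id.
--     ids = {}
--     def intern(t):
--         v = ids.get(t)
--         if v is None:
--             v = len(ids)
--             ids[t] = v
--         return v
--
--     pattern = [intern(tuple(row)) for row in subarray]
--     grid = [[intern(tuple(row[j:j + cols_sub])) for j in range(width)] for row in mainarray]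
--
--     matches = []
--     for i in range(rows_main - rows_sub + 1):
--         for j in range(width):
--             if [g[j] for g in grid[i:i + rows_sub]] == pattern:
--                 matches.append((i, j))
--     return matches
-- ===== Notes on version B (the rewrite author's own statement) =====
-- stated objective: alternative
-- what changed: Instead of re-slicing and list-comparing rows_sub rows of the main array at every candidate position, B interns each sub-row and each row-window once into a small integer id (dimension reduction) and tests a position by comparing the column of ids against the pattern id list.
-- outside the precondition, e.g. on find_all_subarray_coordinates([], [[1]]): A raises IndexError, B raises IndexError; on find_all_subarray_coordinates([[1]], []): A raises IndexError, B raises IndexError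
import Mathlib
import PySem

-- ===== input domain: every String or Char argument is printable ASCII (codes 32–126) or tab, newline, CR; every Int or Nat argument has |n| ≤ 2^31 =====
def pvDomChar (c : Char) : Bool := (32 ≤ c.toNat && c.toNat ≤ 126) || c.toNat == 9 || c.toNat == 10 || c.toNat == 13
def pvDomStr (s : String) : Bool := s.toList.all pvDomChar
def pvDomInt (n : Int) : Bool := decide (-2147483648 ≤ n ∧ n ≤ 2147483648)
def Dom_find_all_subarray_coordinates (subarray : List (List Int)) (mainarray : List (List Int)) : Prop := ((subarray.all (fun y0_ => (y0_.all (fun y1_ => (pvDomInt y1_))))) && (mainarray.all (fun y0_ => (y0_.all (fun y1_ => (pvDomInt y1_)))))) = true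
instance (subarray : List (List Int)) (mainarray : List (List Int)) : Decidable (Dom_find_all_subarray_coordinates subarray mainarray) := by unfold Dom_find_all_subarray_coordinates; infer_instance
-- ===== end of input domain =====

-- B replaces A's per-position re-slicing by interning every sub-row and row-window once into
-- small integer ids and comparing id columns (objective: alternative algorithm, similar cost).

-- ===== PORT A =====
-- inner 'for x in range(rows_sub): … break' loop with its match_found flag: recursion that
-- stops (returns false) at the first mismatching row, true when the range is exhausted
def pvCheckA (subarray mainarray : List (List Int)) (cols_sub i j : Int) : List Int → Bool
  | [] => true
  | x :: xs =>
    if PySem.List.slice (PySem.List.pyGetD mainarray (i + x) []) (some j) (some (j + cols_sub))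
        ≠ PySem.List.pyGetD subarray x [] then false
    else pvCheckA subarray mainarray cols_sub i j xs

def find_all_subarray_coordinates (subarray : List (List Int)) (mainarray : List (List Int)) : List (Int × Int) :=
  let rows_sub := PySem.List.len subarray
  let cols_sub := PySem.List.len (PySem.List.pyGetD subarray 0 [])
  let rows_main := PySem.List.len mainarray
  let cols_main := PySem.List.len (PySem.List.pyGetD mainarray 0 [])
  (PySem.List.pyRange 0 (rows_main - rows_sub + 1) 1).foldl (fun ms i =>
    (PySem.List.pyRange 0 (cols_main - cols_sub + 1) 1).foldl (fun ms j =>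
      if pvCheckA subarray mainarray cols_sub i j (PySem.List.pyRange 0 rows_sub 1)
      then ms ++ [(i, j)] else ms) ms) []

-- ===== PORT B =====
-- ids.get(t) / assign len(ids) on a miss
def pvIntern (d : PySem.Dict (List Int) Int) (t : List Int) : PySem.Dict (List Int) Int × Int :=
  match d.get? t with
  | some v => (d, v)
  | none => (d.insert t (d.size : Int), (d.size : Int))

-- [intern(t) for t in ts] threading the dict
def pvInternList (d : PySem.Dict (List Int) Int) (ts : List (List Int)) :
    PySem.Dict (List Int) Int × List Int :=
  ts.foldl (fun acc t => ((pvIntern acc.1 t).1, acc.2 ++ [(pvIntern acc.1 t).2])) (d, [])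

-- [tuple(row[j:j+cols_sub]) for j in range(width)]
def pvWindows (row : List Int) (cols_sub width : Int) : List (List Int) :=
  (PySem.List.pyRange 0 width 1).map (fun j => PySem.List.slice row (some j) (some (j + cols_sub)))

-- grid = [[intern(window) for each window of row] for row in mainarray]
def pvGridFold (cols_sub width : Int) (d : PySem.Dict (List Int) Int) (rows : List (List Int)) :
    PySem.Dict (List Int) Int × List (List Int) :=
  rows.foldl (fun acc row =>
    ((pvInternList acc.1 (pvWindows row cols_sub width)).1,
      acc.2 ++ [(pvInternList acc.1 (pvWindows row cols_sub width)).2])) (d, [])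

def find_all_subarray_coordinates_alt (subarray : List (List Int)) (mainarray : List (List Int)) : List (Int × Int) :=
  let rows_sub := PySem.List.len subarray
  let cols_sub := PySem.List.len (PySem.List.pyGetD subarray 0 [])
  let rows_main := PySem.List.len mainarray
  let cols_main := PySem.List.len (PySem.List.pyGetD mainarray 0 [])
  let width := cols_main - cols_sub + 1
  let p := pvInternList PySem.Dict.empty subarray
  let g := pvGridFold cols_sub width p.1 mainarray
  (PySem.List.pyRange 0 (rows_main - rows_sub + 1) 1).foldl (fun ms i =>
    (PySem.List.pyRange 0 width 1).foldl (fun ms j =>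
      if (PySem.List.slice g.2 (some i) (some (i + rows_sub))).map
          (fun gr => PySem.List.pyGetD gr j (-1)) = p.2
      then ms ++ [(i, j)] else ms) ms) []

-- ===== PRECONDITION & SPEC =====
-- Pre_ excludes exactly the inputs where Python A raises: subarray == [] or mainarray == []
-- (both make 'len(…[0])' raise IndexError, in A and in B alike).
def Pre_find_all_subarray_coordinates (subarray : List (List Int)) (mainarray : List (List Int)) : Prop :=
  subarray ≠ [] ∧ mainarray ≠ []
instance (subarray : List (List Int)) (mainarray : List (List Int)) : Decidable (Pre_find_all_subarray_coordinates subarray mainarray) := by unfold Pre_find_all_subarray_coordinates; infer_instance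

def pvWitness_find_all_subarray_coordinates : List (List Int) × List (List Int) :=
  ([[1, 2]], [[0, 1, 2], [1, 2, 0]])

def Spec_find_all_subarray_coordinates (subarray : List (List Int)) (mainarray : List (List Int)) (out : List (Int × Int)) : Prop := out = find_all_subarray_coordinates_alt subarray mainarray
instance (subarray : List (List Int)) (mainarray : List (List Int)) (out : List (Int × Int)) : Decidable (Spec_find_all_subarray_coordinates subarray mainarray out) := by unfold Spec_find_all_subarray_coordinates; infer_instance

-- ===== CLAIM (what is proved, stated in full; the proofs are below) =====
def Claim_equal_find_all_subarray_coordinates : Prop := ∀ (subarray : List (List Int)) (mainarray : List (List Int)), Dom_find_all_subarray_coordinates subarray mainarray → Pre_find_all_subarray_coordinates subarray mainarray → Spec_find_all_subarray_coordinates subarray mainarray (find_all_subarray_coordinates subarray mainarray)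

-- ===== LEMMAS AND PROOFS =====

-- the interning invariant: every id is below the dict's size, and ids are injective
def pvGoodD (d : PySem.Dict (List Int) Int) : Prop :=
  (∀ k v, d.get? k = some v → v < (d.size : Int)) ∧
  (∀ k1 k2 v, d.get? k1 = some v → d.get? k2 = some v → k1 = k2)

theorem pvIntern_get (d : PySem.Dict (List Int) Int) (t : List Int) :
    ((pvIntern d t).1).get? t = some (pvIntern d t).2 := by
  unfold pvIntern
  cases h : d.get? t with
  | some v => simp [h]
  | none => simp [PySem.Dict.get?_insert_self]

theorem pvIntern_ext (d : PySem.Dict (List Int) Int) (t k : List Int) (v : Int)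
    (hk : d.get? k = some v) : ((pvIntern d t).1).get? k = some v := by
  unfold pvIntern
  cases h : d.get? t with
  | some w => simpa [h] using hk
  | none =>
    have hne : k ≠ t := by rintro rfl; rw [hk] at h; cases h
    simp [PySem.Dict.get?_insert, hne, hk]

theorem pvIntern_good (d : PySem.Dict (List Int) Int) (t : List Int) (hg : pvGoodD d) :
    pvGoodD (pvIntern d t).1 := by
  obtain ⟨hb, hi⟩ := hg
  unfold pvIntern
  cases h : d.get? t with
  | some v => simpa using ⟨hb, hi⟩
  | none =>
    have hc : d.contains t = false := by rw [PySem.Dict.contains_eq_isSome_get?, h]; rfl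
    have hs : (d.insert t (d.size : Int)).size = d.size + 1 := by
      rw [PySem.Dict.size_insert, hc]; simp
    constructor
    · intro k v hk
      rw [PySem.Dict.get?_insert] at hk
      by_cases e : k = t
      · simp [e] at hk; rw [hs]; push_cast; omega
      · simp [e] at hk; have := hb k v hk; rw [hs]; push_cast; omega
    · intro k1 k2 v h1 h2
      rw [PySem.Dict.get?_insert] at h1 h2
      by_cases e1 : k1 = t <;> by_cases e2 : k2 = t
      · rw [e1, e2]
      · simp [e1, e2] at h1 h2
        exact absurd (hb k2 v h2) (by omega)
      · simp [e1, e2] at h1 h2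
        exact absurd (hb k1 v h1) (by omega)
      · simp [e1, e2] at h1 h2
        exact hi k1 k2 v h1 h2

theorem pvInternList_aux (f : PySem.Dict (List Int) Int × List Int → List Int → PySem.Dict (List Int) Int × List Int)
    (hf : f = fun acc t => ((pvIntern acc.1 t).1, acc.2 ++ [(pvIntern acc.1 t).2]))
    (ts : List (List Int)) (d : PySem.Dict (List Int) Int) (acc : List Int) :
    ts.foldl f (d, acc) = ((pvInternList d ts).1, acc ++ (pvInternList d ts).2) := by
  subst hf
  induction ts generalizing d acc with
  | nil => simp [pvInternList]
  | cons t ts ih =>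
    simp only [List.foldl_cons]
    rw [ih]
    conv_rhs => rw [pvInternList]
    simp only [List.foldl_cons]
    rw [show (ts.foldl (fun acc t => ((pvIntern acc.1 t).1, acc.2 ++ [(pvIntern acc.1 t).2]))
        ((pvIntern d t).1, ([] : List Int) ++ [(pvIntern d t).2]))
      = ((pvInternList (pvIntern d t).1 ts).1, (([] : List Int) ++ [(pvIntern d t).2]) ++ (pvInternList (pvIntern d t).1 ts).2) from ih _ _]
    simp

theorem pvInternList_cons (d : PySem.Dict (List Int) Int) (t : List Int) (ts : List (List Int)) :
    pvInternList d (t :: ts) =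
      ((pvInternList (pvIntern d t).1 ts).1,
        (pvIntern d t).2 :: (pvInternList (pvIntern d t).1 ts).2) := by
  rw [pvInternList]
  simp only [List.foldl_cons]
  rw [pvInternList_aux _ rfl]
  simp

theorem pvInternList_spec (ts : List (List Int)) : ∀ (d : PySem.Dict (List Int) Int), pvGoodD d →
    pvGoodD (pvInternList d ts).1 ∧
    (∀ k v, d.get? k = some v → (pvInternList d ts).1.get? k = some v) ∧
    List.Forall₂ (fun t v => (pvInternList d ts).1.get? t = some v) ts (pvInternList d ts).2 := by
  induction ts with
  | nil =>
    intro d hg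
    refine ⟨by simpa [pvInternList] using hg, fun k v h => by simpa [pvInternList] using h, ?_⟩
    simp [pvInternList]
  | cons t ts ih =>
    intro d hg
    rw [pvInternList_cons]
    obtain ⟨hgood, hext, hfa⟩ := ih (pvIntern d t).1 (pvIntern_good d t hg)
    refine ⟨hgood, ?_, ?_⟩
    · intro k v h
      exact hext k v (pvIntern_ext d t k v h)
    · exact List.Forall₂.cons (hext t (pvIntern d t).2 (pvIntern_get d t)) hfa

theorem pvGridFold_aux (cs w : Int)
    (f : PySem.Dict (List Int) Int × List (List Int) → List Int → PySem.Dict (List Int) Int × List (List Int))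
    (hf : f = fun acc row => ((pvInternList acc.1 (pvWindows row cs w)).1,
      acc.2 ++ [(pvInternList acc.1 (pvWindows row cs w)).2]))
    (rows : List (List Int)) (d : PySem.Dict (List Int) Int) (acc : List (List Int)) :
    rows.foldl f (d, acc) = ((pvGridFold cs w d rows).1, acc ++ (pvGridFold cs w d rows).2) := by
  subst hf
  induction rows generalizing d acc with
  | nil => simp [pvGridFold]
  | cons r rows ih =>
    simp only [List.foldl_cons]
    rw [ih]
    conv_rhs => rw [pvGridFold]
    simp only [List.foldl_cons]
    rw [show (rows.foldl (fun acc row => ((pvInternList acc.1 (pvWindows row cs w)).1,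
        acc.2 ++ [(pvInternList acc.1 (pvWindows row cs w)).2]))
        ((pvInternList d (pvWindows r cs w)).1, ([] : List (List Int)) ++ [(pvInternList d (pvWindows r cs w)).2]))
      = ((pvGridFold cs w (pvInternList d (pvWindows r cs w)).1 rows).1,
          (([] : List (List Int)) ++ [(pvInternList d (pvWindows r cs w)).2]) ++ (pvGridFold cs w (pvInternList d (pvWindows r cs w)).1 rows).2) from ih _ _]
    simp

theorem pvGridFold_cons (cs w : Int) (d : PySem.Dict (List Int) Int) (r : List Int) (rows : List (List Int)) :
    pvGridFold cs w d (r :: rows) =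
      ((pvGridFold cs w (pvInternList d (pvWindows r cs w)).1 rows).1,
        (pvInternList d (pvWindows r cs w)).2 :: (pvGridFold cs w (pvInternList d (pvWindows r cs w)).1 rows).2) := by
  rw [pvGridFold]
  simp only [List.foldl_cons]
  rw [pvGridFold_aux cs w _ rfl]
  simp

theorem pvGridFold_spec (cs w : Int) (rows : List (List Int)) :
    ∀ (d : PySem.Dict (List Int) Int), pvGoodD d →
    pvGoodD (pvGridFold cs w d rows).1 ∧
    (∀ k v, d.get? k = some v → (pvGridFold cs w d rows).1.get? k = some v) ∧
    List.Forall₂ (fun row ids =>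
        List.Forall₂ (fun t v => (pvGridFold cs w d rows).1.get? t = some v) (pvWindows row cs w) ids)
      rows (pvGridFold cs w d rows).2 := by
  induction rows with
  | nil =>
    intro d hg
    refine ⟨by simpa [pvGridFold] using hg, fun k v h => by simpa [pvGridFold] using h, ?_⟩
    simp [pvGridFold]
  | cons r rows ih =>
    intro d hg
    rw [pvGridFold_cons]
    obtain ⟨hg1, hext1, hfa1⟩ := pvInternList_spec (pvWindows r cs w) d hg
    obtain ⟨hgood, hext, hfa⟩ := ih (pvInternList d (pvWindows r cs w)).1 hg1
    refine ⟨hgood, ?_, ?_⟩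
    · intro k v h
      exact hext k v (hext1 k v h)
    · exact List.Forall₂.cons (hfa1.imp (fun {t v} h => hext t v h)) hfa

theorem pvGoodD_empty : pvGoodD (PySem.Dict.empty : PySem.Dict (List Int) Int) := by
  constructor
  · intro k v h; simp [PySem.Dict.get?_empty] at h
  · intro k1 k2 v h1 h2; simp [PySem.Dict.get?_empty] at h1

theorem pvCheckA_iff (sub main : List (List Int)) (cs i j : Int) (xs : List Int) :
    pvCheckA sub main cs i j xs = true ↔
      ∀ x ∈ xs, PySem.List.slice (PySem.List.pyGetD main (i + x) []) (some j) (some (j + cs))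
        = PySem.List.pyGetD sub x [] := by
  induction xs with
  | nil => simp [pvCheckA]
  | cons x xs ih =>
    by_cases h : PySem.List.slice (PySem.List.pyGetD main (i + x) []) (some j) (some (j + cs))
        = PySem.List.pyGetD sub x []
    · simp [pvCheckA, h, ih]
    · simp [pvCheckA, h]

theorem pvForall₂_getD {α β : Type} {R : α → β → Prop} {l1 : List α} {l2 : List β}
    (h : List.Forall₂ R l1 l2) (d1 : α) (d2 : β) (n : Nat) (hn : n < l1.length) :
    R (l1.getD n d1) (l2.getD n d2) := by
  obtain ⟨hl, hget⟩ := List.forall₂_iff_get.mp h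
  rw [List.getD_eq_getElem _ _ hn, List.getD_eq_getElem _ _ (hl ▸ hn)]
  exact hget n hn (hl ▸ hn)

theorem pvWindows_natCast (row : List Int) (cs : Int) (W : Nat) :
    pvWindows row cs (W : Int)
      = (List.range W).map (fun jn : Nat => PySem.List.slice row (some ((jn : Int))) (some ((jn : Int) + cs))) := by
  unfold pvWindows
  rw [PySem.List.pyRange_zero_natCast, List.map_map]
  rfl

theorem pvCondB_iff (sub main : List (List Int)) (cs cm : Int) (i j : Int)
    (hi0 : 0 ≤ i) (hiM : i < (main.length : Int) - (sub.length : Int) + 1)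
    (hj0 : 0 ≤ j) (hjw : j < cm - cs + 1) :
    ((PySem.List.slice (pvGridFold cs (cm - cs + 1) (pvInternList PySem.Dict.empty sub).1 main).2
        (some i) (some (i + (sub.length : Int)))).map
        (fun gr => PySem.List.pyGetD gr j (-1)) = (pvInternList PySem.Dict.empty sub).2)
      ↔ ∀ x ∈ PySem.List.pyRange 0 (sub.length : Int) 1,
          PySem.List.slice (PySem.List.pyGetD main (i + x) []) (some j) (some (j + cs))
            = PySem.List.pyGetD sub x [] := by
  obtain ⟨W, hw⟩ : ∃ W : Nat, cm - cs + 1 = (W : Int) :=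
    ⟨(cm - cs + 1).toNat, (Int.toNat_of_nonneg (by omega)).symm⟩
  obtain ⟨iN, rfl⟩ : ∃ iN : Nat, i = (iN : Int) := ⟨i.toNat, (Int.toNat_of_nonneg hi0).symm⟩
  obtain ⟨jN, rfl⟩ : ∃ jN : Nat, j = (jN : Int) := ⟨j.toNat, (Int.toNat_of_nonneg hj0).symm⟩
  have hjW : jN < W := by omega
  have hiLM : iN + sub.length ≤ main.length := by omega
  obtain ⟨hgp, hextp, hfap⟩ := pvInternList_spec sub PySem.Dict.empty pvGoodD_empty
  obtain ⟨hgF, hextF, hfaF⟩ :=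
    pvGridFold_spec cs (cm - cs + 1) main (pvInternList PySem.Dict.empty sub).1 hgp
  set p := pvInternList PySem.Dict.empty sub with hp
  set g := pvGridFold cs (cm - cs + 1) p.1 main with hg
  have hfap' : List.Forall₂ (fun t v => g.1.get? t = some v) sub p.2 :=
    hfap.imp (fun {t v} h => hextF t v h)
  have hlenp : p.2.length = sub.length := hfap'.length_eq.symm
  have hleng : g.2.length = main.length := hfaF.length_eq.symm
  -- the column condition, element by element
  have hslice : PySem.List.slice g.2 (some (iN : Int)) (some ((iN : Int) + (sub.length : Int)))
      = (g.2.drop iN).take sub.length := PySem.List.slice_natCast_add g.2 iN sub.length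
  have helem : ∀ x, x < sub.length →
      (PySem.List.pyGetD (g.2.getD (iN + x) []) (jN : Int) (-1) = p.2.getD x (-1)
        ↔ PySem.List.slice (main.getD (iN + x) []) (some (jN : Int)) (some ((jN : Int) + cs))
            = sub.getD x []) := by
    intro x hx
    have hm : iN + x < main.length := by omega
    have hrow := pvForall₂_getD hfaF [] [] (iN + x) hm
    rw [hw, pvWindows_natCast] at hrow
    have hglen : (g.2.getD (iN + x) []).length = W := by
      simpa using hrow.length_eq.symm
    have hgj : g.1.get? (PySem.List.slice (main.getD (iN + x) []) (some (jN : Int)) (some ((jN : Int) + cs)))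
        = some ((g.2.getD (iN + x) []).getD jN (-1)) := by
      have := pvForall₂_getD hrow [] (-1) jN (by simpa using hjW)
      rwa [List.getD_eq_getElem _ _ (by simpa using hjW), List.getElem_map, List.getElem_range] at this
    have hpx : g.1.get? (sub.getD x []) = some (p.2.getD x (-1)) :=
      pvForall₂_getD hfap' [] (-1) x hx
    have hpy : PySem.List.pyGetD (g.2.getD (iN + x) []) (jN : Int) (-1)
        = (g.2.getD (iN + x) []).getD jN (-1) := PySem.List.pyGetD_natCast _ _ _
    rw [hpy]
    constructor
    · intro hv
      exact hgF.2 _ _ _ (hv ▸ hgj) hpx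
    · intro hk
      rw [hk] at hgj
      exact Option.some.inj (hgj.symm.trans hpx)
  constructor
  · intro heq x hxmem
    rw [PySem.List.mem_pyRange_one] at hxmem
    obtain ⟨xN, rfl⟩ : ∃ xN : Nat, x = (xN : Int) := ⟨x.toNat, (Int.toNat_of_nonneg hxmem.1).symm⟩
    have hx : xN < sub.length := by exact_mod_cast hxmem.2
    have h1 : xN < (((g.2.drop iN).take sub.length).map (fun gr => PySem.List.pyGetD gr (jN : Int) (-1))).length := by
      simp; omega
    rw [hslice] at heq
    have hval := congrArg (fun l => l.getD xN (-1)) heq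
    simp only at hval
    rw [List.getD_eq_getElem _ _ h1, List.getD_eq_getElem _ _ (by omega : xN < p.2.length),
      List.getElem_map, List.getElem_take, List.getElem_drop] at hval
    rw [← List.getD_eq_getElem p.2 (-1) (by omega), ← List.getD_eq_getElem g.2 [] (by omega)] at hval
    have := (helem xN hx).mp hval
    rw [show (iN : Int) + (xN : Int) = ((iN + xN : Nat) : Int) by push_cast; ring,
      PySem.List.pyGetD_natCast, PySem.List.pyGetD_natCast]
    exact this
  · intro hall
    rw [hslice]
    apply List.ext_getElem (by simp; omega)
    intro x h1 h2
    have hx : x < sub.length := by simp at h1; omega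
    have := hall (x : Int) (by rw [PySem.List.mem_pyRange_one]; constructor <;> [positivity; exact_mod_cast hx])
    rw [show (iN : Int) + (x : Int) = ((iN + x : Nat) : Int) by push_cast; ring,
      PySem.List.pyGetD_natCast, PySem.List.pyGetD_natCast] at this
    have hv := (helem x hx).mpr this
    rw [List.getElem_map, List.getElem_take, List.getElem_drop,
      ← List.getD_eq_getElem g.2 [] (by omega)]
    rw [← List.getD_eq_getElem p.2 (-1) (by omega)]
    exact hv

theorem pvFoldl_ij_congr (l1 l2 : List Int) (p q : Int → Int → Prop)
    [∀ i j, Decidable (p i j)] [∀ i j, Decidable (q i j)]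
    (h : ∀ i ∈ l1, ∀ j ∈ l2, p i j ↔ q i j) (init : List (Int × Int)) :
    l1.foldl (fun acc i => l2.foldl (fun acc j => if p i j then acc ++ [(i, j)] else acc) acc) init
      = l1.foldl (fun acc i => l2.foldl (fun acc j => if q i j then acc ++ [(i, j)] else acc) acc) init := by
  induction l1 generalizing init with
  | nil => rfl
  | cons a l1 ih =>
    simp only [List.foldl_cons]
    rw [PySem.List.foldl_congr_mem l2
      (fun acc j => if p a j then acc ++ [(a, j)] else acc)
      (fun acc j => if q a j then acc ++ [(a, j)] else acc) init
      (fun acc j hj => if_congr (h a (by simp) j hj) rfl rfl)]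
    exact ih (fun i hi j hj => h i (by simp [hi]) j hj) _

-- ===== VERDICT (by name: the statement is the Claim_ definition above) =====
theorem find_all_subarray_coordinates_spec : Claim_equal_find_all_subarray_coordinates := by
  intro sub main hdom hpre
  unfold Spec_find_all_subarray_coordinates
  simp only [find_all_subarray_coordinates, find_all_subarray_coordinates_alt, PySem.List.len_eq]
  apply pvFoldl_ij_congr
  intro i hi j hj
  rw [PySem.List.mem_pyRange_one] at hi hj
  rw [pvCheckA_iff]
  exact (pvCondB_iff sub main _ _ i j hi.1 hi.2 hj.1 hj.2).symm
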